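-- pv_equiv track=rewrite | github.com/ioben/pass-rotate | passrotate/parsers/password_store.py | parse
-- ===== SOURCE A (Python) =====
-- def parse(lines):
--     lines = "".join(lines).splitlines()
--
--     password = ""
--     attributes = {}
--     description_lines = []
--
--     state = "password"
--
--     for i, raw_line in enumerate(lines):
--         line = raw_line.strip()
--
--         # Password must be first line
--         if state == "password":
--             password = raw_line
--             state = "after-password"
--
--         # Read K/V pairs separated by a colon
--         elif state in ["after-password", "attributes"]:
--             if state == "after-password":
--                 state = "attributes"
--                 if not line:
--                     continue
--
--             if line:
--                 key, value = line.split(':', 1)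
--                 attributes[key.strip()] = value.strip()
--             else:
--                 state = "description"
--
--         elif state == "description":
--             description_lines.append(line)
--
--         else:
--             raise Exception("Reached invalid state " + state + ", line: " + str(i + 1))
--
--     return {
--         "password": password,
--         **attributes,
--         "description": "\n".join(description_lines).strip(),
--     }
-- ===== SOURCE B (Python) =====
-- def parse(lines):
--     ls = "".join(lines).splitlines()
--     password = ls[0] if ls else ""
--     body = ls[1:]
--     if body and not body[0].strip():
--         body = body[1:]
--     attr_lines = []
--     for l in body:
--         if not l.strip():
--             break
--         attr_lines.append(l)
--     attrs = {}
--     for l in attr_lines: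
--         key, value = l.strip().split(':', 1)
--         attrs[key.strip()] = value.strip()
--     desc = body[len(attr_lines) + 1:]
--     return {
--         "password": password,
--         **attrs,
--         "description": "\n".join(x.strip() for x in desc).strip(),
--     }
-- ===== Notes on version B (the rewrite author's own statement) =====
-- stated objective: simpler
-- what changed: Replaced A's single for-loop driven by a string state variable with explicit phases over the split lines: take the first line as password, skip one blank line, takeWhile the non-blank attribute lines, and slice off the description after the terminating blank.
import Mathlib
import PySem

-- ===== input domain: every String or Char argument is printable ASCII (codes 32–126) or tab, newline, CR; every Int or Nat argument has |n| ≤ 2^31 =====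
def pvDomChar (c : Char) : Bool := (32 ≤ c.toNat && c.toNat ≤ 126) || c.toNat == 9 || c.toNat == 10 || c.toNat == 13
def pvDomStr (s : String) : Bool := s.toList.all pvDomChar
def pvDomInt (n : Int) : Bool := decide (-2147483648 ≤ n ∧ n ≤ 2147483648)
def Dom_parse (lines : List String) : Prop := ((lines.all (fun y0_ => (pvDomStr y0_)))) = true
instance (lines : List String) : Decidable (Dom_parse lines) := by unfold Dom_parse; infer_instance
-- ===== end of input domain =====

-- B re-parses by explicit phases (header/skip-one-blank/takeWhile attributes/slice description)
-- instead of A's one loop with a string state variable; objective: simpler. Return-value equivalence only.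


-- ===== PORT A =====
-- A's for-loop over the split lines with its "state" string; `none` = the ValueError of
-- `key, value = line.split(':', 1)` when the line has no colon (the only reachable raise;
-- the enumerate index is only used in A's unreachable invalid-state raise and is dropped).
def parseLoop (items : List String) (state password : String)
    (attrs : PySem.Dict String String) (desc : List String) :
    Option (String × PySem.Dict String String × List String) :=
  match items with
  | [] => some (password, attrs, desc)
  | raw :: rest =>
    let line := PySem.Str.strip raw
    if state == "password" then
      parseLoop rest "after-password" raw attrs desc
    else if state == "after-password" || state == "attributes" then
      if state == "after-password" && line == "" then
        parseLoop rest "attributes" password attrs desc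
      else if line ≠ "" then
        match PySem.Str.splitMax? line ":" 1 with
        | some [key, value] =>
            parseLoop rest "attributes" password
              (attrs.insert (PySem.Str.strip key) (PySem.Str.strip value)) desc
        | _ => none
      else
        parseLoop rest "description" password attrs desc
    else if state == "description" then
      parseLoop rest state password attrs (desc ++ [line])
    else none

def parse (lines : List String) : List (String × String) :=
  let ls := PySem.Str.splitlines (PySem.Str.join "" lines)
  match parseLoop ls "password" "" PySem.Dict.empty [] with
  | none => []
  | some (p, attrs, desc) =>
    ((attrs.items.foldl (fun d kv => d.insert kv.1 kv.2)
        (PySem.Dict.empty.insert "password" p)).insert "description"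
        (PySem.Str.strip (PySem.Str.join "\n" desc))).items

-- ===== PORT B =====
-- `key, value = l.strip().split(':', 1)`; none = ValueError (no colon)
def splitColon (l : String) : Option (String × String) :=
  match PySem.Str.splitMax? (PySem.Str.strip l) ":" 1 with
  | some [k, v] => some (PySem.Str.strip k, PySem.Str.strip v)
  | _ => none

-- B's attribute for-loop
def attrFold (ls : List String) (attrs : PySem.Dict String String) :
    Option (PySem.Dict String String) :=
  match ls with
  | [] => some attrs
  | l :: rest =>
    match splitColon l with
    | some (k, v) => attrFold rest (attrs.insert k v)
    | none => none

def parse_alt (lines : List String) : List (String × String) :=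
  let ls := PySem.Str.splitlines (PySem.Str.join "" lines)
  let password := ls.headD ""
  let body0 := ls.drop 1
  let body := match body0 with
    | b :: bs => if PySem.Str.strip b == "" then bs else b :: bs
    | [] => []
  let attrLines := body.takeWhile (fun l => PySem.Str.strip l != "")
  match attrFold attrLines PySem.Dict.empty with
  | none => []
  | some attrs =>
    let desc := (body.drop (attrLines.length + 1)).map PySem.Str.strip
    ((attrs.items.foldl (fun d kv => d.insert kv.1 kv.2)
        (PySem.Dict.empty.insert "password" password)).insert "description"
        (PySem.Str.strip (PySem.Str.join "\n" desc))).items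

-- ===== PRECONDITION & SPEC =====
-- the attribute section of the input: lines after the password line (one immediately
-- following blank line skipped) up to the next blank line
def pvAttrSection (lines : List String) : List String :=
  let ls := PySem.Str.splitlines (PySem.Str.join "" lines)
  let body := match ls.drop 1 with
    | b :: bs => if PySem.Str.strip b == "" then bs else b :: bs
    | [] => []
  body.takeWhile (fun l => PySem.Str.strip l != "")

-- A raises ValueError when a line of the attribute section has no colon; exactly those inputs are excluded.
def Pre_parse (lines : List String) : Prop :=
  ∀ l ∈ pvAttrSection lines, PySem.Str.isIn ":" (PySem.Str.strip l) = true

instance (lines : List String) : Decidable (Pre_parse lines) := by unfold Pre_parse; infer_instance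

def pvWitness_parse : List String := ["hunter2\n", "user: bob\n", "\n", "a note\n"]

def Spec_parse (lines : List String) (out : List (String × String)) : Prop := out = parse_alt lines
instance (lines : List String) (out : List (String × String)) : Decidable (Spec_parse lines out) := by unfold Spec_parse; infer_instance

-- ===== CLAIM (what is proved, stated in full; the proofs are below) =====
def Claim_equal_parse : Prop := ∀ (lines : List String), Dom_parse lines → Pre_parse lines → Spec_parse lines (parse lines)

-- ===== LEMMAS AND PROOFS =====

-- description phase: A's loop in state "description" appends the stripped remaining lines
theorem parseLoop_description (ls : List String) (p : String)
    (a : PySem.Dict String String) (d : List String) :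
    parseLoop ls "description" p a d = some (p, a, d ++ ls.map PySem.Str.strip) := by
  induction ls generalizing d with
  | nil => simp [parseLoop]
  | cons raw rest ih => simp [parseLoop, ih]

-- attributes phase: A's loop in state "attributes" is B's fold over the takeWhile prefix,
-- with the stripped tail after the terminating blank line as description
theorem parseLoop_attributes (ls : List String) (p : String)
    (a : PySem.Dict String String) (d : List String) :
    parseLoop ls "attributes" p a d =
      (attrFold (ls.takeWhile (fun l => PySem.Str.strip l != "")) a).map
        (fun a' => (p, a',
          d ++ (ls.drop ((ls.takeWhile (fun l => PySem.Str.strip l != "")).length + 1)).map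
            PySem.Str.strip)) := by
  induction ls generalizing a with
  | nil => simp [parseLoop, attrFold]
  | cons raw rest ih =>
    by_cases h : PySem.Str.strip raw = ""
    · simp [parseLoop, h, attrFold, parseLoop_description]
    · simp only [List.takeWhile_cons, bne_iff_ne, ne_eq, h, not_false_eq_true,
        if_true]
      cases hs : PySem.Str.splitMax? (PySem.Str.strip raw) ":" 1 with
      | none => simp [parseLoop, h, attrFold, splitColon, hs]
      | some parts =>
        match parts with
        | [] => simp [parseLoop, h, attrFold, splitColon, hs]
        | [k] => simp [parseLoop, h, attrFold, splitColon, hs]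
        | [k, v] => simp [parseLoop, h, attrFold, splitColon, hs, ih]
        | k :: v :: w :: tl => simp [parseLoop, h, attrFold, splitColon, hs]

-- after-password phase: skip one blank line, then behave as state "attributes"
theorem parseLoop_after_password (ls : List String) (p : String)
    (a : PySem.Dict String String) (d : List String) :
    parseLoop ls "after-password" p a d =
      parseLoop (match ls with
        | b :: bs => if PySem.Str.strip b == "" then bs else b :: bs
        | [] => []) "attributes" p a d := by
  cases ls with
  | nil => simp [parseLoop]
  | cons b bs =>
    by_cases h : PySem.Str.strip b = ""
    · simp [parseLoop, h]
    · simp [parseLoop, h]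

-- ===== VERDICT (by name: the statement is the Claim_ definition above) =====
theorem parse_spec : Claim_equal_parse := by
  intro lines _ _
  unfold Spec_parse parse parse_alt
  cases hls : PySem.Str.splitlines (PySem.Str.join "" lines) with
  | nil => dsimp only; simp [parseLoop, attrFold]
  | cons h t =>
    dsimp only
    rw [show parseLoop (h :: t) "password" "" PySem.Dict.empty [] =
          parseLoop t "after-password" h PySem.Dict.empty [] from rfl,
        parseLoop_after_password, parseLoop_attributes]
    simp only [List.headD, List.drop_one, List.tail_cons]
    cases hf : attrFold ((match t with
        | b :: bs => if PySem.Str.strip b == "" then bs else b :: bs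
        | [] => []).takeWhile (fun l => PySem.Str.strip l != "")) PySem.Dict.empty with
    | none => simp
    | some a' => simp
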